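-- pv_equiv track=rewrite | github.com/dojorio/dojo-centro | 2018/20181031 - Andando no Tempo - python/problem.py | viagem
-- ===== SOURCE A (Python) =====
-- import copy
-- from collections import Counter
--
-- def viagem(anos):
--     ocurrences = [n > 1 for n in Counter(anos).values()]
--     highest_year = max(anos)
--     lower_years = copy.copy(anos)
--     lower_years.remove(highest_year)
--
--     if any(ocurrences):
--         return "S"
--
--     if highest_year - sum(lower_years) == 0:
--         return "S"
--
--     return "N"
-- ===== SOURCE B (Python) =====
-- def viagem(anos):
--     s = sorted(anos)
--     if any(a == b for a, b in zip(s, s[1:])):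
--         return "S"
--     return "S" if 2 * s[-1] == sum(s) else "N"
-- ===== Notes on version B (the rewrite author's own statement) =====
-- stated objective: idiomatic
-- what changed: Replaces the Counter/copy/remove machinery with one sorted copy: duplicates are found as equal adjacent elements of the sorted list and the max==sum-of-others test becomes 2*max == sum; Pre_ excludes only the empty list, on which A raises ValueError.
import Mathlib
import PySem

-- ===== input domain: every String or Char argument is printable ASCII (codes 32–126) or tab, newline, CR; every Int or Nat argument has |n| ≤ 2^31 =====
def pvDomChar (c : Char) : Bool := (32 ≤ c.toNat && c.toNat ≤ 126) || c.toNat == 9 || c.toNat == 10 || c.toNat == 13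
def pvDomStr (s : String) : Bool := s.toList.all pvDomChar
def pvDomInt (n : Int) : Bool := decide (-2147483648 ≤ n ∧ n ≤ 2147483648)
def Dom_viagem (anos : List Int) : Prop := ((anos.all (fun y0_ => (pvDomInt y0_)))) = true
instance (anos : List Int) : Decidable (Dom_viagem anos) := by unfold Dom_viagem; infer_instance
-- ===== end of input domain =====

-- B replaces A's Counter/copy/remove machinery by one sorted copy: an adjacent-equal scan finds
-- duplicates and the max-equals-sum-of-others test becomes 2*max == sum (idiomatic; neither
-- version mutates its argument).

-- ===== PORT A =====
def viagem (anos : List Int) : String :=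
  let ocurrences := (PySem.Dict.counter anos).values.map (fun n => decide (1 < n))
  let highest_year := (PySem.List.max? anos (fun y => y)).getD 0   -- max(anos); ValueError on [] excluded by Pre_
  let lower_years := (PySem.List.remove? anos highest_year).getD anos  -- .remove on a copy; always succeeds (max ∈ anos)
  if ocurrences.any id then "S"
  else if highest_year - lower_years.sum = 0 then "S"
  else "N"

-- ===== PORT B =====
def viagem_alt (anos : List Int) : String :=
  let s := PySem.List.sorted anos (fun y => y) false
  if (s.zip (PySem.List.slice s (some 1) none)).any (fun p => p.1 == p.2) then "S"
  else if 2 * PySem.List.pyGetD s (-1) 0 = s.sum then "S"   -- s[-1]; IndexError on [] excluded by Pre_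
  else "N"

-- ===== PRECONDITION & SPEC =====
-- Pre_ excludes exactly the empty list, on which A's max(anos) raises ValueError (and B's s[-1] raises IndexError).
def Pre_viagem (anos : List Int) : Prop := anos ≠ []
instance (anos : List Int) : Decidable (Pre_viagem anos) := by unfold Pre_viagem; infer_instance
def pvWitness_viagem : List Int := [2000, 1990, 10]

def Spec_viagem (anos : List Int) (out : String) : Prop := out = viagem_alt anos
instance (anos : List Int) (out : String) : Decidable (Spec_viagem anos out) := by unfold Spec_viagem; infer_instance

-- ===== CLAIM (what is proved, stated in full; the proofs are below) =====
def Claim_equal_viagem : Prop := ∀ (anos : List Int), Dom_viagem anos → Pre_viagem anos → Spec_viagem anos (viagem anos)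

-- ===== LEMMAS AND PROOFS =====

-- A's duplicate flag: some Counter value exceeds 1 iff anos has a duplicate
lemma occ_any_iff (anos : List Int) :
    ((PySem.Dict.counter anos).values.map (fun n => decide (1 < n))).any id = true ↔ ¬ anos.Nodup := by
  have hv : (PySem.Dict.counter anos).values
      = (PySem.Dict.counter anos).items.map (·.2) := rfl
  rw [hv, PySem.Dict.items_counter]
  simp only [List.map_map, List.any_map, List.any_eq_true, Function.comp, id_eq,
    decide_eq_true_eq, PySem.Set.mem_ofList]
  constructor
  · rintro ⟨k, hk, h⟩ hnd
    have h2 := List.nodup_iff_count_le_one.mp hnd k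
    have : 1 < List.count k anos := by exact_mod_cast h
    omega
  · intro hnd
    rw [List.nodup_iff_count_le_one] at hnd
    push Not at hnd
    obtain ⟨k, hk⟩ := hnd
    exact ⟨k, List.count_pos_iff.mp (by omega), by exact_mod_cast hk⟩

-- B's duplicate scan: a ≤-chained list has an equal adjacent pair iff it has a duplicate
lemma adj_any_iff (s : List Int) (hp : s.Pairwise (· ≤ ·)) :
    ((s.zip s.tail).any (fun p => p.1 == p.2)) = true ↔ ¬ s.Nodup := by
  induction s with
  | nil => simp
  | cons x t ih =>
    cases t with
    | nil => simp
    | cons y u =>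
      have hp' : (y :: u).Pairwise (· ≤ ·) := hp.tail
      by_cases hxy : x = y
      · subst hxy
        simp [List.zip]
      · have hih := ih hp'
        simp only [List.tail_cons, List.zip_cons_cons, List.any_cons] at hih ⊢
        have hbx : (x == y) = false := by simp [hxy]
        rw [hbx]
        simp only [Bool.false_or]
        rw [hih]
        constructor
        · exact fun h hnd => h hnd.tail
        · intro h hnd2
          apply h
          refine List.nodup_cons.mpr ⟨?_, hnd2⟩
          intro hx
          rcases List.mem_cons.mp hx with h1 | h2
          · exact hxy h1
          · have hxle : x ≤ y := (List.pairwise_cons.mp hp).1 y (by simp)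
            have hylex : y ≤ x := (List.pairwise_cons.mp hp').1 x h2
            exact hxy (le_antisymm hxle hylex)

-- B's s[-1] is A's max(anos)
lemma last_sorted_eq_max (anos : List Int) (h : anos ≠ []) (m : Int)
    (hm : PySem.List.max? anos (fun y => y) = some m) :
    PySem.List.pyGetD (PySem.List.sorted anos (fun y => y) false) (-1) 0 = m := by
  have hs : PySem.List.sorted anos (fun y => y) false ≠ [] := by
    rw [Ne, PySem.List.sorted_eq_nil_iff]; exact h
  rw [PySem.List.pyGetD_neg_one _ _ hs]
  have hlast_mem : (PySem.List.sorted anos (fun y => y) false).getLast hs ∈ anos := by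
    rw [← PySem.List.mem_sorted anos (fun y => y) false]
    exact List.getLast_mem hs
  have hle : (PySem.List.sorted anos (fun y => y) false).getLast hs ≤ m :=
    PySem.List.max?_isMax hm _ hlast_mem
  have hmem_s : m ∈ PySem.List.sorted anos (fun y => y) false := by
    rw [PySem.List.mem_sorted]
    exact PySem.List.max?_mem hm
  obtain ⟨i, hi, hie⟩ := List.mem_iff_getElem.mp hmem_s
  have hge : m ≤ (PySem.List.sorted anos (fun y => y) false).getLast hs := by
    rw [List.getLast_eq_getElem, ← hie]
    exact PySem.List.sorted_id_getElem_mono anos (by omega) (by omega)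
  exact le_antisymm hle hge

-- ===== VERDICT (by name: the statement is the Claim_ definition above) =====
theorem viagem_spec : Claim_equal_viagem := by
  intro anos _ hpre
  unfold Spec_viagem viagem viagem_alt
  simp only []
  obtain ⟨m, hm⟩ : ∃ m, PySem.List.max? anos (fun y => y) = some m := by
    cases h' : PySem.List.max? anos (fun y => y) with
    | none => exact absurd ((PySem.List.max?_eq_none_iff anos (fun y => y)).mp h') hpre
    | some m => exact ⟨m, rfl⟩
  rw [hm, PySem.List.slice_from_one]
  have hperm := PySem.List.sorted_perm anos (fun y => y) false
  have hpw : (PySem.List.sorted anos (fun y => y) false).Pairwise (· ≤ ·) :=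
    PySem.List.sorted_pairwise anos (fun y => y)
  have hadj := adj_any_iff _ hpw
  have hndiff : ¬ (PySem.List.sorted anos (fun y => y) false).Nodup ↔ ¬ anos.Nodup := by
    constructor <;> intro h hc
    · exact h (hc.perm hperm.symm)
    · exact h (hc.perm hperm)
  by_cases hnd : anos.Nodup
  · rw [if_neg (by rw [occ_any_iff]; exact not_not_intro hnd),
        if_neg (fun hc => hndiff.mp (hadj.mp hc) hnd)]
    have hmem := PySem.List.max?_mem hm
    rw [Option.getD_some, PySem.List.remove?_eq_some_erase anos m hmem, Option.getD_some]
    rw [last_sorted_eq_max anos hpre m hm, hperm.sum_eq]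
    have hsum : anos.sum = m + (anos.erase m).sum := by
      have := (List.perm_cons_erase hmem).sum_eq
      simpa using this
    by_cases hc : 2 * m = anos.sum
    · rw [if_pos (by omega), if_pos hc]
    · rw [if_neg (by omega), if_neg hc]
  · rw [if_pos (by rw [occ_any_iff]; exact hnd),
        if_pos (hadj.mpr (hndiff.mpr hnd))]
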